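-- pv_equiv track=rewrite | github.com/leixiaolin/smartMusic_v2 | rms_cqt_helper_for_note.py | parse_rhythm_code
-- ===== SOURCE A (Python) =====
-- def parse_rhythm_code(rhythm_code):
--     code = rhythm_code
--     index = 0
--     code = code.replace(";", ',')
--     code = code.replace("[", '')
--     code = code.replace("]", '')
--     if code.find("(") >= 0:
--         tmp = [x for x in code.split(',')]
--         for i in range(len(tmp)):
--             if tmp[i].find("(") >= 0:
--                 index = i
--                 break
--         code = code.replace("(", '')
--         code = code.replace(")", '')
--         code = code.replace("-", '')
--         code = code.replace("--", '')
--     code = [x for x in code.split(',')]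
--     # code = [int(x) for x in code]
--     if index > 0:
--         code[index - 1] += code[index]
--         del code[index]
--     return code
-- ===== SOURCE B (Python) =====
-- def parse_rhythm_code(rhythm_code):
--     # Single left-to-right character scan building the token list directly,
--     # merging at the first '(' by undoing the previous separator (pop+prepend).
--     has_paren = "(" in rhythm_code
--     tokens = []
--     cur = []
--     merged = False
--     for ch in rhythm_code:
--         if ch == "," or ch == ";":
--             tokens.append("".join(cur))
--             cur = []
--         elif ch == "[" or ch == "]":
--             pass
--         elif has_paren and (ch == "(" or ch == ")" or ch == "-"):
--             if ch == "(" and not merged: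
--                 merged = True
--                 if tokens:
--                     cur = list(tokens.pop()) + cur
--         else:
--             cur.append(ch)
--     tokens.append("".join(cur))
--     return tokens
-- ===== Notes on version B (the rewrite author's own statement) =====
-- stated objective: alternative
-- what changed: B replaces A's six staged whole-string replace passes plus split plus token-scan plus in-place merge-and-delete with a single left-to-right character scan that classifies each character (separator, bracket, dropped-when-parenthesized, ordinary), builds the token list directly in one accumulator pass, and performs the merge on the fly at the first opening parenthesis by popping the last finished token back into the current one.
import Mathlib
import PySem

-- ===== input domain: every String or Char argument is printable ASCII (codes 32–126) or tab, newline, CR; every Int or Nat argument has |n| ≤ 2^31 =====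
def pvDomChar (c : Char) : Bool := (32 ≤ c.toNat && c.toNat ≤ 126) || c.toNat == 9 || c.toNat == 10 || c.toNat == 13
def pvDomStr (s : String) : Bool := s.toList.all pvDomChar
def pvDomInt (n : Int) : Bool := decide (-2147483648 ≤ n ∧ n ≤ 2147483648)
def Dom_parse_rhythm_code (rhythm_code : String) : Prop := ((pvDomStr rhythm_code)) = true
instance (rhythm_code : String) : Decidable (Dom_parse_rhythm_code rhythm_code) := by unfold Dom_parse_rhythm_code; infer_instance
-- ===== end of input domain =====

-- B replaces A's staged whole-string replace passes + split + token scan + in-place merge by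
-- ONE left-to-right character scan building the token list directly, merging at the first '('
-- by popping the last finished token (objective: alternative decomposition, same O(n) cost).

-- ===== PORT A =====
-- 'for i in range(len(tmp)): if tmp[i].find("(") >= 0: index = i; break'
def pvLoopA : List String → Nat → Nat → Nat
  | [], _, index => index
  | t :: ts, i, index => if PySem.Str.find t "(" ≥ 0 then i else pvLoopA ts (i + 1) index

def parse_rhythm_code (rhythm_code : String) : List String :=
  let code := rhythm_code
  let index : Nat := 0
  let code := PySem.Str.replace code ";" ","
  let code := PySem.Str.replace code "[" ""
  let code := PySem.Str.replace code "]" ""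
  let ci :=
    if PySem.Str.find code "(" ≥ 0 then
      let tmp := (PySem.Str.split? code ",").getD []
      let index := pvLoopA tmp 0 index
      let code := PySem.Str.replace code "(" ""
      let code := PySem.Str.replace code ")" ""
      let code := PySem.Str.replace code "-" ""
      let code := PySem.Str.replace code "--" ""
      (code, index)
    else (code, index)
  let codeL := (PySem.Str.split? ci.1 ",").getD []
  if ci.2 > 0 then
    (codeL.set (ci.2 - 1) (codeL.getD (ci.2 - 1) "" ++ codeL.getD ci.2 "")).eraseIdx ci.2
  else codeL

-- ===== PORT B =====
-- the 'for ch in rhythm_code' loop of Source B, state = (tokens, cur, merged)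
def pvLoopB (hasParen : Bool) : List Char → List String → List Char → Bool → List String
  | [], tokens, cur, _ => tokens ++ [String.ofList cur]
  | ch :: rest, tokens, cur, merged =>
    if ch = ',' ∨ ch = ';' then
      pvLoopB hasParen rest (tokens ++ [String.ofList cur]) [] merged
    else if ch = '[' ∨ ch = ']' then
      pvLoopB hasParen rest tokens cur merged
    else if hasParen ∧ (ch = '(' ∨ ch = ')' ∨ ch = '-') then
      if ch = '(' ∧ merged = false then
        -- 'merged = True; if tokens: cur = list(tokens.pop()) + cur'
        match tokens.getLast? with
        | some t => pvLoopB hasParen rest tokens.dropLast (t.toList ++ cur) true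
        | none => pvLoopB hasParen rest tokens cur true
      else pvLoopB hasParen rest tokens cur merged
    else pvLoopB hasParen rest tokens (cur ++ [ch]) merged

def parse_rhythm_code_alt (rhythm_code : String) : List String :=
  let hasParen := PySem.Str.isIn "(" rhythm_code
  pvLoopB hasParen rhythm_code.toList [] [] false

-- ===== PRECONDITION & SPEC =====
def Spec_parse_rhythm_code (rhythm_code : String) (out : List String) : Prop := out = parse_rhythm_code_alt rhythm_code
instance (rhythm_code : String) (out : List String) : Decidable (Spec_parse_rhythm_code rhythm_code out) := by unfold Spec_parse_rhythm_code; infer_instance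

-- ===== CLAIM (what is proved, stated in full; the proofs are below) =====
def Claim_equal_parse_rhythm_code : Prop := ∀ (rhythm_code : String), Dom_parse_rhythm_code rhythm_code → Spec_parse_rhythm_code rhythm_code (parse_rhythm_code rhythm_code)

-- ===== LEMMAS AND PROOFS =====

-- normalization used by the specification: ';'→',', then drop brackets, then drop '(' ')' '-'
def pvSemi (c : Char) : Char := if c = ';' then ',' else c
def pvKeep0 (c : Char) : Bool := !(c == '[' || c == ']')
def pvKeep1 (c : Char) : Bool := !(c == '(' || c == ')' || c == '-')
def pvNrm0 (l : List Char) : List Char := (l.map pvSemi).filter pvKeep0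
def pvNrm (l : List Char) : List Char := (pvNrm0 l).filter pvKeep1

-- splitting on one character, accumulator kept in order
def pvSplit2 (c : Char) : List Char → List Char → List (List Char)
  | [], cur => [cur]
  | a :: t, cur => if a = c then cur :: pvSplit2 c t [] else pvSplit2 c t (cur ++ [a])

-- single-character find: first index, or -1
theorem findgo_single (c : Char) (l : List Char) (k : Nat) :
    PySem.Chars.find.go [c] l k = if c ∈ l then ((k + l.idxOf c : Nat) : Int) else -1 := by
  induction l generalizing k with
  | nil => simp [PySem.Chars.find.go]
  | cons a t ih =>
    by_cases h : c = a
    · subst h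
      simp [PySem.Chars.find.go, List.isPrefixOf, List.idxOf_cons_self]
    · have : ([c].isPrefixOf (a :: t)) = false := by
        simp [List.isPrefixOf]; exact h
      simp only [PySem.Chars.find.go, this, Bool.false_eq_true, if_false, ih]
      by_cases hm : c ∈ t
      · simp [hm, List.mem_cons, h, List.idxOf_cons_ne _ (by exact fun h' => h h'.symm)]
        push_cast; ring
      · simp [hm, List.mem_cons, h]

theorem find_single (c : Char) (l : List Char) :
    PySem.Chars.find l [c] = if c ∈ l then ((l.idxOf c : Nat) : Int) else -1 := by
  simpa using findgo_single c l 0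

-- single-character removal is a filter
theorem replacego_single (c : Char) (l acc : List Char) (fuel : Nat) (h : l.length ≤ fuel) :
    PySem.Chars.replace.go [c] [] fuel l acc = acc.reverse ++ l.filter (· ≠ c) := by
  induction l generalizing fuel acc with
  | nil => cases fuel <;> simp [PySem.Chars.replace.go]
  | cons a t ih =>
    cases fuel with
    | zero => simp at h
    | succ f =>
      have hf : t.length ≤ f := by simpa using h
      by_cases hc : c = a
      · subst hc
        simp [PySem.Chars.replace.go, List.isPrefixOf, ih acc f hf]
      · have : ([c].isPrefixOf (a :: t)) = false := by
          simp [List.isPrefixOf]; exact hc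
        have ha : (a ≠ c) = True := by simp; exact fun h' => hc h'.symm
        simp [PySem.Chars.replace.go, this, ih (a :: acc) f hf, List.filter_cons, ha]

theorem replace_single (c : Char) (l : List Char) :
    PySem.Chars.replace l [c] [] = l.filter (· ≠ c) := by
  have h := replacego_single c l [] l.length le_rfl
  simp [PySem.Chars.replace]
  simpa using h

-- one-character-to-one-character replacement is a map
theorem replacego_one_one (c d : Char) (l acc : List Char) (fuel : Nat) (h : l.length ≤ fuel) :
    PySem.Chars.replace.go [c] [d] fuel l acc
      = acc.reverse ++ l.map (fun a => if a = c then d else a) := by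
  induction l generalizing fuel acc with
  | nil => cases fuel <;> simp [PySem.Chars.replace.go]
  | cons a t ih =>
    cases fuel with
    | zero => simp at h
    | succ f =>
      have hf : t.length ≤ f := by simpa using h
      by_cases hc : c = a
      · subst hc
        simp [PySem.Chars.replace.go, List.isPrefixOf, ih (d :: acc) f hf]
      · have : ([c].isPrefixOf (a :: t)) = false := by
          simp [List.isPrefixOf]; exact hc
        have ha : ¬(a = c) := fun h' => hc h'.symm
        simp [PySem.Chars.replace.go, this, ih (a :: acc) f hf, ha]

theorem replace_one_one (c d : Char) (l : List Char) :
    PySem.Chars.replace l [c] [d] = l.map (fun a => if a = c then d else a) := by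
  have h := replacego_one_one c d l [] l.length le_rfl
  simp [PySem.Chars.replace]
  simpa using h

-- replacing a never-occurring pattern is the identity
theorem replacego_dashdash (l acc : List Char) (fuel : Nat) (h : l.length ≤ fuel)
    (hd : '-' ∉ l) : PySem.Chars.replace.go ['-', '-'] [] fuel l acc = acc.reverse ++ l := by
  induction l generalizing fuel acc with
  | nil => cases fuel <;> simp [PySem.Chars.replace.go]
  | cons a t ih =>
    cases fuel with
    | zero => simp at h
    | succ f =>
      have hf : t.length ≤ f := by simpa using h
      have ha : a ≠ '-' := fun h' => hd (by simp [h'])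
      have ht : '-' ∉ t := fun h' => hd (by simp [h'])
      have : (['-', '-'].isPrefixOf (a :: t)) = false := by
        cases t <;> simp [List.isPrefixOf] <;> exact fun h' => (ha h'.symm).elim
      simp [PySem.Chars.replace.go, this, ih (a :: acc) f hf ht]

theorem replace_dashdash (l : List Char) (hd : '-' ∉ l) :
    PySem.Chars.replace l ['-', '-'] [] = l := by
  simp [PySem.Chars.replace]
  exact replacego_dashdash l [] l.length le_rfl hd

-- split on a single character: A's reversed-accumulator recursion
def pvSplitAux (c : Char) : List Char → List Char → List (List Char)
  | [], cur => [cur.reverse]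
  | a :: t, cur => if a = c then cur.reverse :: pvSplitAux c t [] else pvSplitAux c t (a :: cur)

theorem splitgo_single (c : Char) (l cur : List Char) (acc : List (List Char)) (fuel : Nat)
    (h : l.length < fuel) :
    PySem.Chars.splitOn.go [c] fuel l cur acc = acc.reverse ++ pvSplitAux c l cur := by
  induction l generalizing fuel cur acc with
  | nil =>
    cases fuel with
    | zero => simp at h
    | succ f => simp [PySem.Chars.splitOn.go, pvSplitAux]
  | cons a t ih =>
    cases fuel with
    | zero => simp at h
    | succ f =>
      have hf : t.length < f := by simpa using h
      by_cases hc : a = c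
      · subst hc
        simp [PySem.Chars.splitOn.go, List.isPrefixOf, ih [] (cur.reverse :: acc) f hf, pvSplitAux]
      · have : ([c].isPrefixOf (a :: t)) = false := by
          simp [List.isPrefixOf]; exact fun h' => hc h'.symm
        simp [PySem.Chars.splitOn.go, this, ih (a :: cur) acc f hf, pvSplitAux, hc]

theorem splitOn_single (c : Char) (l : List Char) :
    PySem.Chars.splitOn l [c] = pvSplitAux c l [] := by
  simpa [PySem.Chars.splitOn] using splitgo_single c l [] [] (l.length + 1) (by omega)

theorem pvSplitAux_head (c : Char) (l cur : List Char) :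
    ∃ rest, pvSplitAux c l cur = (cur.reverse ++ l.takeWhile (· ≠ c)) :: rest := by
  induction l generalizing cur with
  | nil => exact ⟨[], by simp [pvSplitAux]⟩
  | cons a t ih =>
    by_cases hc : a = c
    · refine ⟨pvSplitAux c t [], ?_⟩
      subst hc
      simp [pvSplitAux]
    · obtain ⟨rest, hr⟩ := ih (a :: cur)
      refine ⟨rest, ?_⟩
      have ha : (a ≠ c) = True := by simp [hc]
      simp [pvSplitAux, hc, hr, ha]

-- A's accumulator-reversed split is B's in-order split
theorem pvSplitAux_to_split2 (c : Char) (l cur : List Char) :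
    pvSplitAux c l cur = pvSplit2 c l cur.reverse := by
  induction l generalizing cur with
  | nil => simp [pvSplitAux, pvSplit2]
  | cons a t ih =>
    by_cases hc : a = c
    · subst hc; simp [pvSplitAux, pvSplit2, ih]
    · have h2 := ih (a :: cur)
      simp only [pvSplitAux, pvSplit2, hc, if_false, h2, List.reverse_cons]

-- helper: membership in a token via Str.find
theorem strfind_paren (t : List Char) :
    (PySem.Str.find (String.ofList t) "(" ≥ 0) ↔ '(' ∈ t := by
  have : ("(" : String).toList = ['('] := by decide
  rw [PySem.Str.find]
  simp only [this, String.toList_ofList, find_single]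
  by_cases hm : '(' ∈ t <;> simp [hm]

-- A's scan over the split tokens = comma count before the first '('
theorem loopA_eq_count (cs : List Char) (h : '(' ∈ cs) :
    ∀ cur, '(' ∉ cur → ∀ i d,
      pvLoopA ((pvSplitAux ',' cs cur).map String.ofList) i d
        = i + (cs.takeWhile (· ≠ '(')).count ',' := by
  induction cs with
  | nil => simp at h
  | cons a t ih =>
    intro cur hcur i d
    by_cases hp : a = '('
    · subst hp
      obtain ⟨rest, hr⟩ := pvSplitAux_head ',' ('(' :: t) cur
      rw [hr]
      have hmem : '(' ∈ cur.reverse ++ ('(' :: t).takeWhile (· ≠ ',') := by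
        simp [List.takeWhile_cons]
      simp only [List.map_cons, pvLoopA, (strfind_paren _).2 hmem, if_true]
      simp [List.takeWhile_cons]
    · have hpt : '(' ∈ t := by
        rcases List.mem_cons.mp h with h1 | h1
        · exact absurd h1.symm hp
        · exact h1
      by_cases hc : a = ','
      · subst hc
        simp only [pvSplitAux, if_true, List.map_cons]
        have hfind : ¬ (PySem.Str.find (String.ofList cur.reverse) "(" ≥ 0) := by
          rw [strfind_paren]; simpa using hcur
        simp only [pvLoopA, hfind, if_false]
        rw [ih hpt [] (by simp) (i + 1) d]
        have : (',' ≠ '(') = True := by decide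
        simp [List.takeWhile_cons, List.count_cons]
        omega
      · simp only [pvSplitAux, hc, if_false]
        rw [ih hpt (a :: cur) (by simp [hcur]; exact fun h' => hp h'.symm) i d]
        simp [List.takeWhile_cons, hp, List.count_cons, hc]

-- the in-place merge-and-delete = the take/getD/drop splice
theorem merge_eq (l : List String) (i : Nat) (h0 : 0 < i) (hl : i < l.length) :
    (l.set (i - 1) (l.getD (i - 1) "" ++ l.getD i "")).eraseIdx i
      = l.take (i - 1) ++ [l.getD (i - 1) "" ++ l.getD i ""] ++ l.drop (i + 1) := by
  rw [List.set_eq_take_append_cons_drop, if_pos (by omega), List.eraseIdx_eq_take_drop_succ,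
    List.take_append, List.drop_append]
  have h1 : (l.take (i - 1)).length = i - 1 := by rw [List.length_take]; omega
  rw [h1]
  have e1 : i - (i - 1) = 1 := by omega
  have e2 : i + 1 - (i - 1) = 2 := by omega
  have e3 : List.take i (l.take (i - 1)) = l.take (i - 1) := by
    rw [List.take_take]; congr 1; omega
  have e4 : List.drop (i + 1) (l.take (i - 1)) = [] := by
    apply List.drop_of_length_le; omega
  rw [e1, e2, e3, e4]
  simp [List.drop_drop]
  omega

-- the take/getD/drop splice on a concretely shaped list
theorem merge_concrete (W : List String) (w y : String) (tl : List String) :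
    (W ++ w :: y :: tl).take (W.length + 1 - 1)
      ++ [(W ++ w :: y :: tl).getD (W.length + 1 - 1) "" ++ (W ++ w :: y :: tl).getD (W.length + 1) ""]
      ++ (W ++ w :: y :: tl).drop (W.length + 1 + 1)
      = W ++ (w ++ y) :: tl := by
  induction W with
  | nil => simp
  | cons a V ih =>
    simpa [List.getD_cons_succ] using ih

-- branch condition of A
theorem strfind_ge_iff (s : String) : (PySem.Str.find s "(" ≥ 0) ↔ '(' ∈ s.toList := by
  have ht : ("(" : String).toList = ['('] := by decide
  rw [PySem.Str.find, ht, find_single]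
  by_cases hm : '(' ∈ s.toList <;> simp [hm]

-- branch condition of B
theorem strIsIn_eq (s : String) : (PySem.Str.isIn "(" s = true) ↔ '(' ∈ s.toList := by
  have ht : ("(" : String).toList = ['('] := by decide
  rw [PySem.Str.isIn, PySem.Chars.isIn, ht, find_single]
  by_cases hm : '(' ∈ s.toList <;> simp [hm]

-- split with "," as a String-level statement
theorem split_getD (s : String) :
    (PySem.Str.split? s ",").getD [] = (pvSplitAux ',' s.toList []).map String.ofList := by
  have ht : ("," : String).toList = [','] := by decide
  rw [PySem.Str.split?, PySem.Chars.split?, ht]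
  simp [splitOn_single]

-- pvSplit2 basics
theorem split2_ne_nil (c : Char) (l cur : List Char) : pvSplit2 c l cur ≠ [] := by
  induction l generalizing cur with
  | nil => simp [pvSplit2]
  | cons a t ih => by_cases hc : a = c <;> simp [pvSplit2, hc, ih]

theorem split2_sep (c : Char) (t cur : List Char) :
    pvSplit2 c (c :: t) cur = cur :: pvSplit2 c t [] := by
  simp [pvSplit2]

theorem split2_ne (c a : Char) (h : ¬ a = c) (t cur : List Char) :
    pvSplit2 c (a :: t) cur = pvSplit2 c t (cur ++ [a]) := by
  simp [pvSplit2, h]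

theorem split2_eq (c : Char) (l : List Char) : ∀ cur,
    pvSplit2 c l cur = (cur ++ l.takeWhile (· ≠ c)) :: (pvSplit2 c l []).tail := by
  induction l with
  | nil => intro cur; simp [pvSplit2]
  | cons a t ih =>
    intro cur
    by_cases hc : a = c
    · subst hc; simp [pvSplit2, List.takeWhile_cons]
    · rw [split2_ne c a hc t cur, split2_ne c a hc t [], ih (cur ++ [a]), ih ([] ++ [a])]
      rw [List.takeWhile_cons_of_pos (by simp [hc])]
      simp

theorem split2_append (c : Char) (x y : List Char) : ∀ cur,
    pvSplit2 c (x ++ y) cur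
      = (pvSplit2 c x cur).dropLast ++ pvSplit2 c y ((pvSplit2 c x cur).getLastD []) := by
  induction x with
  | nil => intro cur; simp [pvSplit2]
  | cons a t ih =>
    intro cur
    by_cases hc : a = c
    · subst hc
      have hne := split2_ne_nil a t ([] : List Char)
      obtain ⟨b, bt, hb⟩ := List.exists_cons_of_ne_nil hne
      rw [List.cons_append, split2_sep, split2_sep, ih [], hb]
      simp
    · rw [List.cons_append, split2_ne c a hc (t ++ y) cur, split2_ne c a hc t cur, ih (cur ++ [a])]

theorem split2_length (c : Char) (l : List Char) : ∀ cur,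
    (pvSplit2 c l cur).length = l.count c + 1 := by
  induction l with
  | nil => intro cur; simp [pvSplit2]
  | cons a t ih =>
    intro cur
    by_cases hc : a = c
    · subst hc; simp [pvSplit2, ih, List.count_cons]
    · have ha : ¬(c = a) := fun h' => hc h'.symm
      simp [pvSplit2, hc, ih, List.count_cons, ha]

-- normalization cons steps
theorem nrm0_cons_sep (a : Char) (h : a = ',' ∨ a = ';') (t : List Char) :
    pvNrm0 (a :: t) = ',' :: pvNrm0 t := by
  rcases h with h | h <;> subst h <;> simp [pvNrm0, pvSemi, pvKeep0]

theorem nrm0_cons_br (a : Char) (h : a = '[' ∨ a = ']') (t : List Char) :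
    pvNrm0 (a :: t) = pvNrm0 t := by
  rcases h with h | h <;> subst h <;> simp [pvNrm0, pvSemi, pvKeep0]

theorem nrm0_cons_other (a : Char) (h1 : ¬(a = ',' ∨ a = ';')) (h2 : ¬(a = '[' ∨ a = ']'))
    (t : List Char) : pvNrm0 (a :: t) = a :: pvNrm0 t := by
  have hs : pvSemi a = a := by
    unfold pvSemi; rw [if_neg (fun h => h1 (Or.inr h))]
  have hk : pvKeep0 a = true := by
    rw [not_or] at h2
    simp [pvKeep0, h2.1, h2.2]
  simp [pvNrm0, List.filter_cons, hs, hk]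

theorem nrm_cons_sep (a : Char) (h : a = ',' ∨ a = ';') (t : List Char) :
    pvNrm (a :: t) = ',' :: pvNrm t := by
  unfold pvNrm
  rw [nrm0_cons_sep a h t]
  simp [pvKeep1, List.filter_cons]

theorem nrm_cons_br (a : Char) (h : a = '[' ∨ a = ']') (t : List Char) :
    pvNrm (a :: t) = pvNrm t := by
  unfold pvNrm
  rw [nrm0_cons_br a h t]

theorem nrm_cons_par (a : Char) (h : a = '(' ∨ a = ')' ∨ a = '-') (t : List Char) :
    pvNrm (a :: t) = pvNrm t := by
  have h1 : ¬(a = ',' ∨ a = ';') := by rcases h with h | h | h <;> subst h <;> decide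
  have h2 : ¬(a = '[' ∨ a = ']') := by rcases h with h | h | h <;> subst h <;> decide
  have hk : pvKeep1 a = false := by rcases h with h | h | h <;> subst h <;> decide
  unfold pvNrm
  rw [nrm0_cons_other a h1 h2 t]
  simp [List.filter_cons, hk]

theorem nrm_cons_other (a : Char) (h1 : ¬(a = ',' ∨ a = ';')) (h2 : ¬(a = '[' ∨ a = ']'))
    (h3 : ¬(a = '(' ∨ a = ')' ∨ a = '-')) (t : List Char) :
    pvNrm (a :: t) = a :: pvNrm t := by
  have hk : pvKeep1 a = true := by
    rw [not_or, not_or] at h3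
    simp [pvKeep1, h3.1, h3.2.1, h3.2.2]
  unfold pvNrm
  rw [nrm0_cons_other a h1 h2 t]
  simp [List.filter_cons, hk]

-- commuting the '('-prefix with the bracket normalization
theorem takeWhile_nrm0 (l : List Char) :
    (pvNrm0 l).takeWhile (· ≠ '(') = pvNrm0 (l.takeWhile (· ≠ '(')) := by
  induction l with
  | nil => simp [pvNrm0]
  | cons a t ih =>
    by_cases hp : a = '('
    · subst hp
      rw [List.takeWhile_cons_of_neg (by simp)]
      rw [nrm0_cons_other '(' (by decide) (by decide) t]
      rw [List.takeWhile_cons_of_neg (by simp)]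
      simp [pvNrm0]
    · by_cases hsep : a = ',' ∨ a = ';'
      · rw [nrm0_cons_sep a hsep t, List.takeWhile_cons_of_pos (by decide),
          List.takeWhile_cons_of_pos (by simp [hp]), nrm0_cons_sep a hsep, ih]
      · by_cases hbr : a = '[' ∨ a = ']'
        · rw [nrm0_cons_br a hbr t, List.takeWhile_cons_of_pos (by simp [hp]),
            nrm0_cons_br a hbr, ih]
        · rw [nrm0_cons_other a hsep hbr t, List.takeWhile_cons_of_pos (by simp [hp]),
            List.takeWhile_cons_of_pos (by simp [hp]), nrm0_cons_other a hsep hbr, ih]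

theorem count_nrm (l : List Char) : (pvNrm l).count ',' = (pvNrm0 l).count ',' := by
  unfold pvNrm
  rw [List.count_filter]
  decide

theorem mem_nrm0_paren (l : List Char) : '(' ∈ pvNrm0 l ↔ '(' ∈ l := by
  induction l with
  | nil => simp [pvNrm0]
  | cons a t ih =>
    by_cases hsep : a = ',' ∨ a = ';'
    · have ha : ¬('(' = a) := by rcases hsep with h | h <;> subst h <;> decide
      rw [nrm0_cons_sep a hsep t]
      simp [ih, ha]
    · by_cases hbr : a = '[' ∨ a = ']'
      · have ha : ¬('(' = a) := by rcases hbr with h | h <;> subst h <;> decide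
        rw [nrm0_cons_br a hbr t]
        simp [ih, ha]
      · rw [nrm0_cons_other a hsep hbr t]
        simp [ih]

theorem nrm_append_paren (xs ys : List Char) :
    pvNrm (xs ++ '(' :: ys) = pvNrm xs ++ pvNrm ys := by
  unfold pvNrm pvNrm0
  simp [pvSemi, pvKeep0, pvKeep1]

theorem exists_paren_split (l : List Char) (h : '(' ∈ l) :
    ∃ ys, l = l.takeWhile (· ≠ '(') ++ '(' :: ys := by
  induction l with
  | nil => simp at h
  | cons a t ih =>
    by_cases hp : a = '('
    · subst hp
      refine ⟨t, ?_⟩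
      rw [List.takeWhile_cons_of_neg (by simp)]
      simp
    · have hpt : '(' ∈ t := by
        rcases List.mem_cons.mp h with h1 | h1
        · exact absurd h1.symm hp
        · exact h1
      obtain ⟨ys, hy⟩ := ih hpt
      refine ⟨ys, ?_⟩
      rw [List.takeWhile_cons_of_pos (by simp [hp]), List.cons_append]
      exact congrArg (a :: ·) hy

-- list shape helpers
theorem exists_singleton_of_length_one {α : Type} (l : List α) (h : l.length = 1) :
    ∃ z, l = [z] := by
  cases l with
  | nil => simp at h
  | cons a t =>
    cases t with
    | nil => exact ⟨a, rfl⟩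
    | cons b u => simp at h

theorem exists_two_last {α : Type} (l : List α) (h : 2 ≤ l.length) :
    ∃ W w z, l = W ++ [w, z] := by
  have hrev : l = l.reverse.reverse := by simp
  obtain ⟨z, r1, h1⟩ : ∃ z r1, l.reverse = z :: r1 := by
    cases hr : l.reverse with
    | nil => rw [List.reverse_eq_nil_iff] at hr; subst hr; simp at h
    | cons a t => exact ⟨a, t, rfl⟩
  obtain ⟨w, r2, h2⟩ : ∃ w r2, r1 = w :: r2 := by
    cases hr : r1 with
    | nil =>
      subst hr
      have := congrArg List.length h1
      simp at this
      omega
    | cons a t => exact ⟨a, t, rfl⟩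
  refine ⟨r2.reverse, w, z, ?_⟩
  rw [hrev, h1, h2]
  simp

-- pvLoopB single steps
theorem loopB_sep (hp : Bool) (a : Char) (h : a = ',' ∨ a = ';')
    (rest : List Char) (tokens : List String) (cur : List Char) (m : Bool) :
    pvLoopB hp (a :: rest) tokens cur m
      = pvLoopB hp rest (tokens ++ [String.ofList cur]) [] m := by
  simp only [pvLoopB, if_pos h]

theorem loopB_br (hp : Bool) (a : Char) (h1 : ¬(a = ',' ∨ a = ';')) (h2 : a = '[' ∨ a = ']')
    (rest : List Char) (tokens : List String) (cur : List Char) (m : Bool) :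
    pvLoopB hp (a :: rest) tokens cur m = pvLoopB hp rest tokens cur m := by
  simp only [pvLoopB, if_neg h1, if_pos h2]

theorem loopB_skip (a : Char) (h1 : ¬(a = ',' ∨ a = ';')) (h2 : ¬(a = '[' ∨ a = ']'))
    (h3 : a = '(' ∨ a = ')' ∨ a = '-') (rest : List Char) (tokens : List String)
    (cur : List Char) (m : Bool) (h4 : ¬(a = '(' ∧ m = false)) :
    pvLoopB true (a :: rest) tokens cur m = pvLoopB true rest tokens cur m := by
  simp only [pvLoopB, if_neg h1, if_neg h2, if_neg h4]
  rw [if_pos (show True ∧ (a = '(' ∨ a = ')' ∨ a = '-') from ⟨trivial, h3⟩)]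

theorem loopB_mergeStep (rest : List Char) (tokens : List String) (cur : List Char) :
    pvLoopB true ('(' :: rest) tokens cur false
      = (match tokens.getLast? with
         | some t => pvLoopB true rest tokens.dropLast (t.toList ++ cur) true
         | none => pvLoopB true rest tokens cur true) := by
  simp only [pvLoopB]
  rw [if_neg (by decide), if_neg (by decide)]
  simp

theorem loopB_keep (hp : Bool) (a : Char) (h1 : ¬(a = ',' ∨ a = ';'))
    (h2 : ¬(a = '[' ∨ a = ']')) (h3 : ¬(hp = true ∧ (a = '(' ∨ a = ')' ∨ a = '-')))
    (rest : List Char) (tokens : List String) (cur : List Char) (m : Bool) :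
    pvLoopB hp (a :: rest) tokens cur m = pvLoopB hp rest tokens (cur ++ [a]) m := by
  simp only [pvLoopB, if_neg h1, if_neg h2, if_neg h3]

-- B's loop, hasParen = false: plain split of the bracket-free ';'-normalized text
theorem loopB_false (cs : List Char) : ∀ tokens cur m,
    pvLoopB false cs tokens cur m
      = tokens ++ (pvSplit2 ',' (pvNrm0 cs) cur).map String.ofList := by
  induction cs with
  | nil => intro tokens cur m; simp [pvLoopB, pvNrm0, pvSplit2]
  | cons a t ih =>
    intro tokens cur m
    by_cases hsep : a = ',' ∨ a = ';'
    · rw [loopB_sep false a hsep, ih, nrm0_cons_sep a hsep, split2_sep]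
      simp
    · by_cases hbr : a = '[' ∨ a = ']'
      · rw [loopB_br false a hsep hbr, ih, nrm0_cons_br a hbr]
      · rw [loopB_keep false a hsep hbr (by simp), ih, nrm0_cons_other a hsep hbr,
          split2_ne ',' a (fun h => hsep (Or.inl h))]

-- B's loop after the merge has happened: split of the fully cleaned text
theorem loopB_merged (cs : List Char) : ∀ tokens cur,
    pvLoopB true cs tokens cur true
      = tokens ++ (pvSplit2 ',' (pvNrm cs) cur).map String.ofList := by
  induction cs with
  | nil => intro tokens cur; simp [pvLoopB, pvNrm, pvNrm0, pvSplit2]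
  | cons a t ih =>
    intro tokens cur
    by_cases hsep : a = ',' ∨ a = ';'
    · rw [loopB_sep true a hsep, ih, nrm_cons_sep a hsep, split2_sep]
      simp
    · by_cases hbr : a = '[' ∨ a = ']'
      · rw [loopB_br true a hsep hbr, ih, nrm_cons_br a hbr]
      · by_cases hpr : a = '(' ∨ a = ')' ∨ a = '-'
        · rw [loopB_skip a hsep hbr hpr t tokens cur true (by simp), ih, nrm_cons_par a hpr]
        · rw [loopB_keep true a hsep hbr (by simp [hpr]), ih, nrm_cons_other a hsep hbr hpr,
            split2_ne ',' a (fun h => hsep (Or.inl h))]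

-- B's loop before the first '(': tokens built from the cleaned prefix, then pop-merge
theorem loopB_pre (xs : List Char) (hx : '(' ∉ xs) (ys : List Char) : ∀ tokens cur,
    pvLoopB true (xs ++ '(' :: ys) tokens cur false
      = (match (tokens ++ ((pvSplit2 ',' (pvNrm xs) cur).dropLast.map String.ofList)).getLast? with
         | some t =>
             pvLoopB true ys
               (tokens ++ ((pvSplit2 ',' (pvNrm xs) cur).dropLast.map String.ofList)).dropLast
               (t.toList ++ (pvSplit2 ',' (pvNrm xs) cur).getLastD []) true
         | none => pvLoopB true ys
               (tokens ++ ((pvSplit2 ',' (pvNrm xs) cur).dropLast.map String.ofList))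
               ((pvSplit2 ',' (pvNrm xs) cur).getLastD []) true) := by
  induction xs with
  | nil =>
    intro tokens cur
    rw [List.nil_append, loopB_mergeStep]
    simp [pvNrm, pvNrm0, pvSplit2]
  | cons a t ih =>
    intro tokens cur
    have ha : a ≠ '(' := fun h => hx (by simp [h])
    have ht : '(' ∉ t := fun h => hx (by simp [h])
    by_cases hsep : a = ',' ∨ a = ';'
    · have hS := split2_ne_nil ',' (pvNrm t) ([] : List Char)
      obtain ⟨b, bt, hb⟩ := List.exists_cons_of_ne_nil hS
      rw [List.cons_append, loopB_sep true a hsep, ih ht (tokens ++ [String.ofList cur]) [],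
        nrm_cons_sep a hsep, split2_sep, hb]
      simp
    · by_cases hbr : a = '[' ∨ a = ']'
      · rw [List.cons_append, loopB_br true a hsep hbr, ih ht tokens cur, nrm_cons_br a hbr]
      · by_cases hpr : a = ')' ∨ a = '-'
        · rw [List.cons_append,
            loopB_skip a hsep hbr (Or.inr hpr) _ tokens cur false (fun h => ha h.1),
            ih ht tokens cur, nrm_cons_par a (Or.inr hpr)]
        · have hnp : ¬(a = '(' ∨ a = ')' ∨ a = '-') := by
            rw [not_or]
            exact ⟨ha, hpr⟩
          rw [List.cons_append, loopB_keep true a hsep hbr (by simp [hnp]),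
            ih ht tokens (cur ++ [a]), nrm_cons_other a hsep hbr hnp,
            split2_ne ',' a (fun h => hsep (Or.inl h))]

-- ===== VERDICT (by name: the statement is the Claim_ definition above) =====
set_option maxHeartbeats 1600000 in
theorem parse_rhythm_code_spec : Claim_equal_parse_rhythm_code := by
  intro rc _
  unfold Spec_parse_rhythm_code
  show parse_rhythm_code rc = parse_rhythm_code_alt rc
  unfold parse_rhythm_code parse_rhythm_code_alt
  dsimp only
  have hsemi : (";" : String).toList = [';'] := by decide
  have hcomma : ("," : String).toList = [','] := by decide
  have hlb : ("[" : String).toList = ['['] := by decide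
  have hrb : ("]" : String).toList = [']'] := by decide
  have hlp : ("(" : String).toList = ['('] := by decide
  have hrp : (")" : String).toList = [')'] := by decide
  have hda : ("-" : String).toList = ['-'] := by decide
  have hem : ("" : String).toList = [] := by decide
  have hps : (fun a : Char => if a = ';' then ',' else a) = pvSemi := rfl
  set s := PySem.Str.replace (PySem.Str.replace (PySem.Str.replace rc ";" ",") "[" "") "]" ""
    with hsdef
  have hsl : s.toList = pvNrm0 rc.toList := by
    rw [hsdef]
    simp only [PySem.Str.toList_replace, hsemi, hcomma, hlb, hrb, hem,
      replace_one_one, replace_single]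
    rw [List.filter_filter, hps]
    unfold pvNrm0
    apply List.filter_congr
    intro a _
    by_cases h1 : a = '[' <;> by_cases h2 : a = ']' <;> simp [pvKeep0, h1, h2]
  clear_value s
  have hmem0 : '(' ∈ s.toList ↔ '(' ∈ rc.toList := by rw [hsl]; exact mem_nrm0_paren _
  by_cases hmem : '(' ∈ rc.toList
  · -- the paren branch on both sides
    rw [if_pos ((strfind_ge_iff s).2 (hmem0.2 hmem))]
    have hB : PySem.Str.isIn "(" rc = true := (strIsIn_eq rc).2 hmem
    rw [hB]
    set b3 := PySem.Str.replace (PySem.Str.replace (PySem.Str.replace s "(" "") ")" "") "-" ""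
      with hb3
    have hb3l : b3.toList = pvNrm rc.toList := by
      rw [hb3]
      simp only [PySem.Str.toList_replace, hlp, hrp, hda, hem, replace_single]
      rw [List.filter_filter, List.filter_filter, hsl]
      unfold pvNrm
      apply List.filter_congr
      intro a _
      by_cases h1 : a = '(' <;> by_cases h2 : a = ')' <;> by_cases h3 : a = '-' <;>
        simp [pvKeep1, h1, h2, h3]
    have hnb : '-' ∉ b3.toList := by
      rw [hb3l]
      unfold pvNrm
      intro hmm
      have := (List.mem_filter.mp hmm).2
      simp [pvKeep1] at this
    have hclean : PySem.Str.replace b3 "--" "" = b3 := by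
      have h1 : (PySem.Str.replace b3 "--" "").toList = b3.toList := by
        rw [PySem.Str.toList_replace]
        have hdd : ("--" : String).toList = ['-', '-'] := by decide
        rw [hdd, hem]
        exact replace_dashdash _ hnb
      have h2 := congrArg String.ofList h1
      rwa [String.ofList_toList, String.ofList_toList] at h2
    clear_value b3
    rw [hclean]
    -- xs / ys decomposition of rc.toList at the first '('
    obtain ⟨ys, hu⟩ := exists_paren_split rc.toList hmem
    set xs := rc.toList.takeWhile (· ≠ '(') with hxs
    have hxmem : '(' ∉ xs := by
      intro hmm
      have := List.mem_takeWhile_imp hmm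
      simp at this
    -- A's index
    have hidx : pvLoopA ((PySem.Str.split? s ",").getD []) 0 0 = (pvNrm xs).count ',' := by
      rw [split_getD]
      have h1 := loopA_eq_count s.toList (hmem0.2 hmem) [] (by simp) 0 0
      rw [h1, hsl, takeWhile_nrm0, ← hxs, count_nrm]
      simp
    rw [hidx]
    have hsplitA : (PySem.Str.split? b3 ",").getD []
        = (pvSplit2 ',' (pvNrm rc.toList) []).map String.ofList := by
      rw [split_getD, hb3l, pvSplitAux_to_split2]
      simp
    have hnrmu : pvNrm rc.toList = pvNrm xs ++ pvNrm ys := by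
      conv_lhs => rw [hu]
      exact nrm_append_paren xs ys
    have hBrun : pvLoopB true rc.toList [] [] false
        = (match ((pvSplit2 ',' (pvNrm xs) []).dropLast.map String.ofList).getLast? with
           | some t =>
               pvLoopB true ys
                 ((pvSplit2 ',' (pvNrm xs) []).dropLast.map String.ofList).dropLast
                 (t.toList ++ (pvSplit2 ',' (pvNrm xs) []).getLastD []) true
           | none => pvLoopB true ys
                 ((pvSplit2 ',' (pvNrm xs) []).dropLast.map String.ofList)
                 ((pvSplit2 ',' (pvNrm xs) []).getLastD []) true) := by
      conv_lhs => rw [hu]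
      have := loopB_pre xs hxmem ys [] []
      simpa using this
    rw [hsplitA, hBrun]
    have hSlen : (pvSplit2 ',' (pvNrm xs) ([] : List Char)).length = (pvNrm xs).count ',' + 1 :=
      split2_length ',' (pvNrm xs) []
    by_cases hpos : 0 < (pvNrm xs).count ','
    · -- index > 0: merge happens
      rw [if_pos hpos]
      obtain ⟨W, w, z, hSshape⟩ :=
        exists_two_last (pvSplit2 ',' (pvNrm xs) []) (by omega)
      have hWlen' : W.length = (pvNrm xs).count ',' - 1 := by
        have := congrArg List.length hSshape
        rw [hSlen] at this
        simp at this
        omega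
      have hdropW : (pvSplit2 ',' (pvNrm xs) ([] : List Char)).dropLast = W ++ [w] := by
        rw [hSshape]
        have hw : W ++ [w, z] = (W ++ [w]) ++ [z] := by simp
        rw [hw, List.dropLast_concat]
      have hlastS : (pvSplit2 ',' (pvNrm xs) ([] : List Char)).getLastD [] = z := by
        rw [hSshape]
        have hw : W ++ [w, z] = (W ++ [w]) ++ [z] := by simp
        rw [hw]
        exact List.getLastD_concat
      rw [hdropW, hlastS]
      have hmapW : (W ++ [w]).map String.ofList = W.map String.ofList ++ [String.ofList w] := by
        simp
      rw [hmapW, List.getLast?_concat, List.dropLast_concat]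
      simp only [String.toList_ofList]
      rw [loopB_merged ys (W.map String.ofList) (w ++ z)]
      -- A's side
      rw [hnrmu, split2_append ',' (pvNrm xs) (pvNrm ys) [], hSshape]
      have h1 : (W ++ [w, z]).dropLast = W ++ [w] := by
        have hw : W ++ [w, z] = (W ++ [w]) ++ [z] := by simp
        rw [hw, List.dropLast_concat]
      have h2 : (W ++ [w, z]).getLastD [] = z := by
        have hw : W ++ [w, z] = (W ++ [w]) ++ [z] := by simp
        rw [hw]
        exact List.getLastD_concat
      rw [h1, h2]
      rw [split2_eq ',' (pvNrm ys) z]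
      set tw := (pvNrm ys).takeWhile (· ≠ ',') with htw
      set tl := (pvSplit2 ',' (pvNrm ys) []).tail with htl
      have hlist : ((W ++ [w]) ++ (z ++ tw) :: tl).map String.ofList
          = W.map String.ofList
              ++ String.ofList w :: String.ofList (z ++ tw) :: tl.map String.ofList := by
        simp
      rw [hlist]
      have hiW : (pvNrm xs).count ',' = (W.map String.ofList).length + 1 := by
        simp [hWlen']
        omega
      rw [hiW]
      rw [merge_eq _ _ (by omega) (by simp)]
      rw [merge_concrete (W.map String.ofList) (String.ofList w) (String.ofList (z ++ tw))
        (tl.map String.ofList)]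
      rw [split2_eq ',' (pvNrm ys) (w ++ z), ← htw, ← htl]
      simp
    · -- index = 0: no merge
      rw [if_neg hpos]
      have hS1 : (pvSplit2 ',' (pvNrm xs) ([] : List Char)).length = 1 := by omega
      obtain ⟨z, hz⟩ := exists_singleton_of_length_one _ hS1
      have hgl : ([z] : List (List Char)).getLastD [] = z := by simp
      rw [hz, hgl]
      simp only [List.dropLast, List.map_nil, List.getLast?_nil]
      rw [loopB_merged ys [] z, hnrmu, split2_append ',' (pvNrm xs) (pvNrm ys) [], hz, hgl]
      simp
  · -- no '(' anywhere: plain split on both sides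
    rw [if_neg (fun h => hmem (hmem0.1 ((strfind_ge_iff s).1 h)))]
    have hB : PySem.Str.isIn "(" rc = false := by
      rcases Bool.eq_false_or_eq_true (PySem.Str.isIn "(" rc) with h | h
      · exact absurd ((strIsIn_eq rc).1 h) hmem
      · exact h
    rw [hB]
    rw [split_getD, hsl, pvSplitAux_to_split2, loopB_false rc.toList [] [] false]
    simp
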